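-- pv_equiv track=rewrite | github.com/TarasKo13/CPPT_Kohut_TY_KI-35_2 | lab/ki305/kohut/lab7/matrix.py | generate_matrix_with_center
-- ===== SOURCE A (Python) =====
-- def generate_matrix_with_center(size):
--     """
--     Генерує квадратну матрицю із заштрихованою центральною областю.
--     :param size: Розмір квадратної матриці (повинно бути непарним)
--     :return: Матриця з центральним квадратом
--     """
--     matrix = []
--     center_start = size // 4
--     center_end = size - center_start
--
--     for i in range(size):
--         row = []
--         for j in range(size):
--             # Заповнюємо центр матриці (заштрихована область)
--             if center_start <= i < center_end and center_start <= j < center_end: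
--                 row.append("1")  # Заштрихована область
--             else:
--                 row.append(" ")  # Порожні комірки
--         matrix.append(row)
--     return matrix
-- ===== SOURCE B (Python) =====
-- def generate_matrix_with_center(size):
--     center_start = size // 4
--     center_end = size - center_start
--     filled = ([" "] * center_start
--               + ["1"] * (center_end - center_start)
--               + [" "] * (size - center_end))
--     empty = [" "] * size
--     return [list(filled) if center_start <= i < center_end else list(empty)
--             for i in range(size)]
-- ===== Notes on version B (the rewrite author's own statement) =====
-- stated objective: alternative
-- what changed: Replaces the per-cell nested loop and branch with two precomputed row templates (filled band and all-space) assembled by replication, copying the right template once per row.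
import Mathlib
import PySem

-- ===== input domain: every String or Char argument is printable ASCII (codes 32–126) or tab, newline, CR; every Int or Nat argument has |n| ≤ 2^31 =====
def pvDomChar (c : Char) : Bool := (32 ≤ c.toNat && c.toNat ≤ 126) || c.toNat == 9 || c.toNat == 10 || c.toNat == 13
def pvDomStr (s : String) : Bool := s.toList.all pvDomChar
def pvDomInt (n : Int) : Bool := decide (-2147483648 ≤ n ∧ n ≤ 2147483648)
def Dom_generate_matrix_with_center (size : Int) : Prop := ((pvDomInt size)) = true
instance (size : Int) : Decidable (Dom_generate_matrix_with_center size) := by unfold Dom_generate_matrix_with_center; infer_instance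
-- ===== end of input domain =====

-- B builds each row from two precomputed templates (replicated blocks) instead of A's per-cell loop; alternative decomposition, same cost.

-- ===== PORT A =====
def generate_matrix_with_center (size : Int) : List (List String) :=
  let center_start := PySem.Int.floordiv size 4
  let center_end := size - center_start
  (PySem.List.pyRange 0 size 1).foldl
    (fun matrix i =>
      matrix ++ [(PySem.List.pyRange 0 size 1).foldl
        (fun row j =>
          row ++ [if center_start ≤ i ∧ i < center_end ∧ center_start ≤ j ∧ j < center_end
                  then "1" else " "]) []]) []

-- ===== PORT B =====
def generate_matrix_with_center_alt (size : Int) : List (List String) :=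
  let center_start := PySem.Int.floordiv size 4
  let center_end := size - center_start
  let filled := List.replicate center_start.toNat " "
      ++ List.replicate (center_end - center_start).toNat "1"
      ++ List.replicate (size - center_end).toNat " "
  let empty := List.replicate size.toNat " "
  (PySem.List.pyRange 0 size 1).map
    (fun i => if center_start ≤ i ∧ i < center_end then filled else empty)

-- ===== PRECONDITION & SPEC =====
def Spec_generate_matrix_with_center (size : Int) (out : List (List String)) : Prop := out = generate_matrix_with_center_alt size
instance (size : Int) (out : List (List String)) : Decidable (Spec_generate_matrix_with_center size out) := by unfold Spec_generate_matrix_with_center; infer_instance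

-- ===== CLAIM (what is proved, stated in full; the proofs are below) =====
def Claim_equal_generate_matrix_with_center : Prop := ∀ (size : Int), Dom_generate_matrix_with_center size → Spec_generate_matrix_with_center size (generate_matrix_with_center size)

-- ===== LEMMAS AND PROOFS =====

-- foldl with append-singleton is map
theorem pv_foldl_append_map {α β : Type} (l : List α) (f : α → β) (acc : List β) :
    l.foldl (fun r x => r ++ [f x]) acc = acc ++ l.map f := by
  induction l generalizing acc with
  | nil => simp
  | cons x xs ih => simp [ih, List.append_assoc]

-- a map that is constant on a range segment is a replicate
theorem pv_map_const_on {α β : Type} (l : List α) (f : α → β) (c : β)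
    (h : ∀ x ∈ l, f x = c) : l.map f = List.replicate l.length c := by
  induction l with
  | nil => simp
  | cons x xs ih =>
    simp only [List.map_cons, List.length_cons, List.replicate_succ]
    exact congrArg₂ _ (h x (by simp)) (ih (fun y hy => h y (by simp [hy])))

-- the inner row of A equals B's template for row i
theorem pv_row_eq (size cs ce i : Int) (hcs : 0 ≤ cs) (hle : cs ≤ ce) (hce : ce ≤ size) :
    (PySem.List.pyRange 0 size 1).map
        (fun j => if cs ≤ i ∧ i < ce ∧ cs ≤ j ∧ j < ce then "1" else " ")
      = if cs ≤ i ∧ i < ce then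
          List.replicate cs.toNat " " ++ List.replicate (ce - cs).toNat "1"
            ++ List.replicate (size - ce).toNat " "
        else List.replicate size.toNat " " := by
  by_cases hi : cs ≤ i ∧ i < ce
  · rw [if_pos hi]
    rw [PySem.List.pyRange_one_append 0 cs size hcs (le_trans hle hce),
        PySem.List.pyRange_one_append cs ce size hle hce]
    rw [List.map_append, List.map_append]
    rw [pv_map_const_on (PySem.List.pyRange 0 cs 1) _ " "
          (by intro x hx; rw [PySem.List.mem_pyRange_one] at hx
              simp only [hi.1, hi.2, true_and]
              rw [if_neg]; omega),
        pv_map_const_on (PySem.List.pyRange cs ce 1) _ "1"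
          (by intro x hx; rw [PySem.List.mem_pyRange_one] at hx
              rw [if_pos ⟨hi.1, hi.2, hx.1, hx.2⟩]),
        pv_map_const_on (PySem.List.pyRange ce size 1) _ " "
          (by intro x hx; rw [PySem.List.mem_pyRange_one] at hx
              rw [if_neg]; omega)]
    simp [PySem.List.length_pyRange_one]
  · rw [if_neg hi]
    rw [pv_map_const_on (PySem.List.pyRange 0 size 1) _ " "
          (by intro x hx; rw [if_neg]; tauto)]
    simp [PySem.List.length_pyRange_one]

-- size // 4 with positive size keeps the bands inside the matrix
theorem pv_band_bounds (size : Int) (h : 0 ≤ size) :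
    0 ≤ PySem.Int.floordiv size 4 ∧
    PySem.Int.floordiv size 4 ≤ size - PySem.Int.floordiv size 4 ∧
    size - PySem.Int.floordiv size 4 ≤ size := by
  rw [PySem.Int.floordiv_eq_ediv_of_pos (by omega : (0:Int) < 4)]
  have h1 := Int.ediv_add_emod size 4
  have h2 := Int.emod_nonneg size (by omega : (4:Int) ≠ 0)
  have h3 := Int.emod_lt_of_pos size (by omega : (0:Int) < 4)
  omega

-- ===== VERDICT (by name: the statement is the Claim_ definition above) =====
theorem generate_matrix_with_center_spec : Claim_equal_generate_matrix_with_center := by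
  intro size _
  unfold Spec_generate_matrix_with_center generate_matrix_with_center generate_matrix_with_center_alt
  simp only []
  rw [pv_foldl_append_map, List.nil_append]
  by_cases hs : 0 ≤ size
  · obtain ⟨hcs, hle, hce⟩ := pv_band_bounds size hs
    apply List.map_congr_left
    intro i _
    rw [pv_foldl_append_map, List.nil_append]
    exact pv_row_eq size _ _ i hcs hle hce
  · rw [PySem.List.pyRange_one_eq_nil (by omega)]
    simp
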